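-- pv_equiv track=rewrite | github.com/hrandonbong/Testing | leetcode.py | getServedBuildings
-- ===== SOURCE A (Python) =====
-- def getServedBuildings(buildingCount, routerLocation, routerRange):
--     served_buildings = 0
--
--     difference_array = [0]*(len(buildingCount)+1)
--
--     for router in range(len(routerLocation)):
--         lo = routerLocation[router] - 1 - routerRange[router]
--         hi = routerLocation[router] - 1 + routerRange[router]
--
--         if lo < 0:
--             lo = 0
--
--         if hi >= len(difference_array):
--             hi = len(difference_array)-1
--
--         difference_array[lo] += 1
--         difference_array[hi] -= 1
--
--     for i in range(1,len(difference_array)):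
--         difference_array[i] = difference_array[i] + difference_array[i-1]
--
--     for building in range(len(buildingCount)):
--         if difference_array[building] >= buildingCount[building]:
--             served_buildings += 1
--
--     return served_buildings
-- ===== SOURCE B (Python) =====
-- def getServedBuildings(buildingCount, routerLocation, routerRange):
--     n = len(buildingCount)
--     served = 0
--     for b in range(n):
--         covered = 0
--         for r in range(len(routerLocation)):
--             lo = routerLocation[r] - 1 - routerRange[r]
--             hi = routerLocation[r] - 1 + routerRange[r]
--             if max(0, lo) <= b < min(n, hi):
--                 covered += 1
--         if covered >= buildingCount[b]:
--             served += 1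
--     return served
-- ===== Notes on version B (the rewrite author's own statement) =====
-- stated objective: simpler
-- what changed: Replaces the mutable difference-array plus in-place prefix-sum passes with a direct per-building rescan that counts, for each building, the routers whose half-open clamped interval [max(0,loc-1-rng), min(n,loc-1+rng)) contains it.
-- outside the precondition, e.g. on getServedBuildings([1, 1], [1], [-1]): A returns 1, B returns 0; on getServedBuildings([1, 1, 1], [-1], [1]): A returns 3, B returns 0
import Mathlib
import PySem

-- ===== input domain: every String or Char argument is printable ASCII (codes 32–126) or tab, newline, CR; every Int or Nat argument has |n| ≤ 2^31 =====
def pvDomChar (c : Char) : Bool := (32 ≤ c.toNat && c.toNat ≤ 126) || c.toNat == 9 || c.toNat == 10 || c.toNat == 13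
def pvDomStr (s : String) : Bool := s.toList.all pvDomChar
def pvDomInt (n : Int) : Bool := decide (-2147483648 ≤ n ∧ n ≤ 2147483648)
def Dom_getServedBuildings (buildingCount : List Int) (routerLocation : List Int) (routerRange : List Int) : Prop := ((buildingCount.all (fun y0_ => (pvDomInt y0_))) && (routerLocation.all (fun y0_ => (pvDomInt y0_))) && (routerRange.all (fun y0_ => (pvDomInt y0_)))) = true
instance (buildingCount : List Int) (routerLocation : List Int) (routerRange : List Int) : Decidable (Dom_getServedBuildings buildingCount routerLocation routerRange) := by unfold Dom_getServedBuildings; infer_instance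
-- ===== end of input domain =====

-- B replaces A's mutable difference array and in-place prefix-sum pass by a direct per-building
-- rescan of the routers (no mutation; not claimed faster).

-- ===== PORT A =====
-- body of A's first for-loop (one router's two difference-array writes)
def pvStep1 (routerLocation routerRange : List Int) (d : List Int) (router : Int) : List Int :=
  let lo0 := PySem.List.pyGetD routerLocation router 0 - 1 - PySem.List.pyGetD routerRange router 0
  let hi0 := PySem.List.pyGetD routerLocation router 0 - 1 + PySem.List.pyGetD routerRange router 0
  let lo := if lo0 < 0 then 0 else lo0
  let hi := if hi0 ≥ PySem.List.len d then PySem.List.len d - 1 else hi0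
  let d1 := PySem.List.pySetD d lo (PySem.List.pyGetD d lo 0 + 1)
  PySem.List.pySetD d1 hi (PySem.List.pyGetD d1 hi 0 - 1)

-- body of A's second for-loop (in-place prefix sum)
def pvStep2 (d : List Int) (i : Int) : List Int :=
  PySem.List.pySetD d i (PySem.List.pyGetD d i 0 + PySem.List.pyGetD d (i - 1) 0)

def getServedBuildings (buildingCount : List Int) (routerLocation : List Int) (routerRange : List Int) : Int :=
  let difference_array : List Int := List.replicate (buildingCount.length + 1) 0
  let difference_array := (PySem.List.pyRange 0 (PySem.List.len routerLocation) 1).foldl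
      (pvStep1 routerLocation routerRange) difference_array
  let difference_array := (PySem.List.pyRange 1 (PySem.List.len difference_array) 1).foldl
      pvStep2 difference_array
  (PySem.List.pyRange 0 (PySem.List.len buildingCount) 1).foldl (fun s b =>
      if PySem.List.pyGetD difference_array b 0 ≥ PySem.List.pyGetD buildingCount b 0 then s + 1 else s) 0

-- ===== PORT B =====
-- body of B's inner for-loop (does router r cover building b?)
def pvCovStep (routerLocation routerRange : List Int) (n b : Int) (c : Int) (r : Int) : Int :=
  let lo := PySem.List.pyGetD routerLocation r 0 - 1 - PySem.List.pyGetD routerRange r 0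
  let hi := PySem.List.pyGetD routerLocation r 0 - 1 + PySem.List.pyGetD routerRange r 0
  if max 0 lo ≤ b ∧ b < min n hi then c + 1 else c

def getServedBuildings_alt (buildingCount : List Int) (routerLocation : List Int) (routerRange : List Int) : Int :=
  let n := PySem.List.len buildingCount
  (PySem.List.pyRange 0 n 1).foldl (fun served b =>
      let covered := (PySem.List.pyRange 0 (PySem.List.len routerLocation) 1).foldl
          (pvCovStep routerLocation routerRange n b) 0
      if covered ≥ PySem.List.pyGetD buildingCount b 0 then served + 1 else served) 0

-- ===== PRECONDITION & SPEC =====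
-- Pre_ admits exactly the inputs where A raises no IndexError (a range entry for every location, and
-- every router's clamped write indices inside the difference array) AND where the per-building decisions
-- provably coincide: either every router interval is well-formed after clamping (the problem's natural
-- domain), or every building threshold lies outside [-m, m] (m = number of routers), or all ranges are
-- nonnegative and every threshold is ≤ 0 or > m — in the latter two cases each building's decision is
-- threshold-forced; excluded are malformed-router inputs (negative range, or interval entirely left of
-- the array) with small thresholds, where A's negative-index-wraparound / inverted-interval
-- difference-array writes produce accidental values.
def Pre_getServedBuildings (buildingCount : List Int) (routerLocation : List Int) (routerRange : List Int) : Prop :=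
  routerLocation.length ≤ routerRange.length ∧
  (∀ k ∈ List.range routerLocation.length,
    routerLocation.getD k 0 - 1 - routerRange.getD k 0 ≤ (buildingCount.length : Int) ∧
    -((buildingCount.length : Int) + 1) ≤ routerLocation.getD k 0 - 1 + routerRange.getD k 0) ∧
  ((∀ k ∈ List.range routerLocation.length,
      max 0 (routerLocation.getD k 0 - 1 - routerRange.getD k 0)
        ≤ min (buildingCount.length : Int) (routerLocation.getD k 0 - 1 + routerRange.getD k 0)) ∨
   (∀ v ∈ buildingCount,
      (routerLocation.length : Int) < v ∨ v ≤ -(routerLocation.length : Int)) ∨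
   ((∀ k ∈ List.range routerLocation.length, 0 ≤ routerRange.getD k 0) ∧
    ∀ v ∈ buildingCount, v ≤ 0 ∨ (routerLocation.length : Int) < v))
instance (buildingCount : List Int) (routerLocation : List Int) (routerRange : List Int) : Decidable (Pre_getServedBuildings buildingCount routerLocation routerRange) := by unfold Pre_getServedBuildings; infer_instance

def pvWitness_getServedBuildings : List Int × List Int × List Int := ([0, 2, 1], [2], [1])

def Spec_getServedBuildings (buildingCount : List Int) (routerLocation : List Int) (routerRange : List Int) (out : Int) : Prop := out = getServedBuildings_alt buildingCount routerLocation routerRange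
instance (buildingCount : List Int) (routerLocation : List Int) (routerRange : List Int) (out : Int) : Decidable (Spec_getServedBuildings buildingCount routerLocation routerRange out) := by unfold Spec_getServedBuildings; infer_instance

-- ===== CLAIM (what is proved, stated in full; the proofs are below) =====
def Claim_equal_getServedBuildings : Prop := ∀ (buildingCount : List Int) (routerLocation : List Int) (routerRange : List Int), Dom_getServedBuildings buildingCount routerLocation routerRange → Pre_getServedBuildings buildingCount routerLocation routerRange → Spec_getServedBuildings buildingCount routerLocation routerRange (getServedBuildings buildingCount routerLocation routerRange)

-- ===== LEMMAS AND PROOFS =====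

-- B's per-router coverage condition for building b
abbrev pvP (loc rng : List Int) (n b r : Int) : Prop :=
  max 0 (PySem.List.pyGetD loc r 0 - 1 - PySem.List.pyGetD rng r 0) ≤ b ∧
  b < min n (PySem.List.pyGetD loc r 0 - 1 + PySem.List.pyGetD rng r 0)

-- A's difference array after the first loop
def pvDiff1 (bc loc rng : List Int) : List Int :=
  (PySem.List.pyRange 0 (loc.length : Int) 1).foldl (pvStep1 loc rng)
    (List.replicate (bc.length + 1) 0)

-- prefix sum of the first b+1 entries of the difference array
def pvS (d : List Int) (b : Nat) : Int := (d.take (b + 1)).sum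

theorem pvS_zero (d : List Int) : pvS d 0 = d.getD 0 0 := by
  cases d <;> simp [pvS]

theorem pvS_succ (d : List Int) (j : Nat) : pvS d (j + 1) = pvS d j + d.getD (j + 1) 0 := by
  rw [pvS, pvS, List.take_add_one, List.sum_append, List.getD_eq_getElem?_getD]
  cases h : d[j + 1]? <;> simp

theorem pvSumSet (l : List Int) (j : Nat) (hj : j < l.length) (x : Int) :
    (l.set j x).sum = l.sum - l[j] + x := by
  induction l generalizing j with
  | nil => simp at hj
  | cons a l ih =>
    cases j with
    | zero => simp [List.sum_cons]; ring
    | succ j => simp [List.sum_cons, ih j (by simpa using hj)]; ring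

theorem pvS_set (d : List Int) (j : Nat) (hj : j < d.length) (v : Int) (b : Nat) :
    pvS (d.set j (d[j] + v)) b = pvS d b + if (j : Int) ≤ (b : Int) then v else 0 := by
  by_cases hjb : j ≤ b
  · have hjlen : j < (d.take (b + 1)).length := by simp [List.length_take]; omega
    rw [pvS, List.take_set, pvSumSet _ j hjlen _, List.getElem_take,
      if_pos (by exact_mod_cast hjb)]
    simp only [pvS]
    ring
  · rw [pvS, List.take_set, List.set_eq_of_length_le (by simp [List.length_take]; omega),
      if_neg (by exact_mod_cast hjb), add_zero]
    rfl

-- writing at a negative Python index is writing at length + i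
theorem pvSetD_neg (xs : List Int) (k : Nat) (h0 : 0 < k) (h1 : k ≤ xs.length) (v : Int) :
    PySem.List.pySetD xs (-(k : Int)) v = xs.set (xs.length - k) v := by
  have h : PySem.List.pyIdx? xs.length (-(k : Int)) = some (xs.length - k) := by
    unfold PySem.List.pyIdx?
    rw [if_neg (by omega), if_pos (by omega), neg_neg]
    simp
  simp [PySem.List.pySetD, PySem.List.pySet?, h]

-- the two writes of one router, for ANY non-raising write indices (I may be negative: wraparound)
theorem pvStep_two_writes (d : List Int) (n : Nat) (hd : d.length = n + 1) (L I : Int)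
    (hL0 : 0 ≤ L) (hLn : L ≤ (n : Int)) (hI : -((n : Int) + 1) ≤ I) (hIn : I ≤ (n : Int))
    (b : Nat) (hb : b < n) :
    pvS (PySem.List.pySetD (PySem.List.pySetD d L (PySem.List.pyGetD d L 0 + 1)) I
          (PySem.List.pyGetD (PySem.List.pySetD d L (PySem.List.pyGetD d L 0 + 1)) I 0 - 1)) b
      = pvS d b + (if L ≤ (b : Int) then 1 else 0)
          - (if (if 0 ≤ I then I else I + ((n : Int) + 1)) ≤ (b : Int) then 1 else 0) := by
  have hdl : (d.length : Int) = (n : Int) + 1 := by exact_mod_cast congrArg (Nat.cast (R := Int)) hd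
  rw [PySem.List.pyGetD_eq_getElem d 0 hL0 (by omega), PySem.List.pySetD_of_nonneg d _ hL0]
  have hlen1 : (d.set L.toNat (d[L.toNat] + 1)).length = n + 1 := by simp [hd]
  by_cases h0I : 0 ≤ I
  · rw [PySem.List.pyGetD_eq_getElem (d.set L.toNat (d[L.toNat] + 1)) 0 h0I
          (by rw [hlen1]; omega),
        PySem.List.pySetD_of_nonneg (d.set L.toNat (d[L.toNat] + 1)) _ h0I,
        sub_eq_add_neg,
        pvS_set (d.set L.toNat (d[L.toNat] + 1)) I.toNat (by omega) (-1) b,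
        pvS_set d L.toNat (by omega) 1 b]
    have h1 : ((L.toNat : Int) ≤ (b : Int)) ↔ L ≤ (b : Int) := by omega
    have h2 : ((I.toNat : Int) ≤ (b : Int)) ↔ I ≤ (b : Int) := by omega
    rw [if_congr h1 rfl rfl, if_congr h2 rfl rfl, if_pos h0I]
    split_ifs <;> omega
  · have hk : I = -(((-I).toNat : Nat) : Int) := by omega
    rw [hk,
        PySem.List.pyGetD_neg_natCast (d.set L.toNat (d[L.toNat] + 1)) (-I).toNat 0
          (by omega) (by rw [hlen1]; omega),
        pvSetD_neg (d.set L.toNat (d[L.toNat] + 1)) (-I).toNat (by omega)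
          (by rw [hlen1]; omega),
        sub_eq_add_neg,
        pvS_set (d.set L.toNat (d[L.toNat] + 1)) ((d.set L.toNat (d[L.toNat] + 1)).length - (-I).toNat)
          (by rw [hlen1]; omega) (-1) b,
        pvS_set d L.toNat (by omega) 1 b]
    have h1 : ((L.toNat : Int) ≤ (b : Int)) ↔ L ≤ (b : Int) := by omega
    have h2 : ((((d.set L.toNat (d[L.toNat] + 1)).length - (-I).toNat : Nat) : Int) ≤ (b : Int))
        ↔ I + ((n : Int) + 1) ≤ (b : Int) := by
      rw [hlen1] at *
      omega
    rw [if_congr h1 rfl rfl, if_congr h2 rfl rfl, ← hk, if_neg h0I]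
    split_ifs <;> omega

theorem pvA_fold1 (bc loc rng : List Int)
    (hnice : ∀ k ∈ List.range loc.length,
      max 0 (loc.getD k 0 - 1 - rng.getD k 0)
        ≤ min (bc.length : Int) (loc.getD k 0 - 1 + rng.getD k 0))
    (rs : List Int)
    (hrs : ∀ r ∈ rs, 0 ≤ r ∧ r < (loc.length : Int)) :
    ∀ d : List Int, d.length = bc.length + 1 →
      (rs.foldl (pvStep1 loc rng) d).length = bc.length + 1 ∧
      ∀ b : Nat, b < bc.length →
        pvS (rs.foldl (pvStep1 loc rng) d) b
          = pvS d b
            + (rs.countP (fun r => decide (pvP loc rng (bc.length : Int) (b : Int) r)) : Int) := by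
  induction rs with
  | nil => intro d hd; simp [hd]
  | cons r rs ih =>
    intro d hd
    obtain ⟨hr0, hrlt⟩ := hrs r (by simp)
    have hrs' : ∀ x ∈ rs, 0 ≤ x ∧ x < (loc.length : Int) :=
      fun x hx => hrs x (List.mem_cons_of_mem _ hx)
    have hstep_len : (pvStep1 loc rng d r).length = bc.length + 1 := by
      simp [pvStep1, PySem.List.length_pySetD, hd]
    rw [List.foldl_cons]
    obtain ⟨hlen', hsum'⟩ := ih hrs' (pvStep1 loc rng d r) hstep_len
    refine ⟨hlen', ?_⟩
    intro b hb
    rw [hsum' b hb]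
    have hkmem : r.toNat ∈ List.range loc.length := List.mem_range.mpr (by omega)
    have hgl : loc.getD r.toNat 0 = PySem.List.pyGetD loc r 0 := by
      conv_rhs => rw [← Int.toNat_of_nonneg hr0]
      rw [PySem.List.pyGetD_natCast]
    have hgr : rng.getD r.toNat 0 = PySem.List.pyGetD rng r 0 := by
      conv_rhs => rw [← Int.toNat_of_nonneg hr0]
      rw [PySem.List.pyGetD_natCast]
    have hn := hnice r.toNat hkmem
    rw [hgl, hgr] at hn
    -- one router's step shifts the prefix sum by its coverage indicator
    have hone : pvS (pvStep1 loc rng d r) b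
        = pvS d b + (if pvP loc rng (bc.length : Int) (b : Int) r then 1 else 0) := by
      simp only [pvStep1, PySem.List.len_eq, hd]
      rw [pvStep_two_writes d bc.length hd _ _ (by split_ifs <;> omega)
            (by split_ifs <;> omega)
            (by split_ifs <;> push_cast <;> omega)
            (by split_ifs <;> push_cast <;> omega) b hb]
      split_ifs <;> omega
    rw [hone, List.countP_cons]
    rcases Decidable.em (pvP loc rng (bc.length : Int) (b : Int) r) with hp | hp
    · rw [if_pos hp, decide_eq_true hp, if_pos rfl]
      push_cast
      omega
    · rw [if_neg hp, decide_eq_false hp, if_neg (by simp)]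
      omega

theorem pvA_fold1_bound (bc loc rng : List Int)
    (hnr : ∀ k ∈ List.range loc.length,
      loc.getD k 0 - 1 - rng.getD k 0 ≤ (bc.length : Int) ∧
      -((bc.length : Int) + 1) ≤ loc.getD k 0 - 1 + rng.getD k 0)
    (rs : List Int)
    (hrs : ∀ r ∈ rs, 0 ≤ r ∧ r < (loc.length : Int)) :
    ∀ d : List Int, d.length = bc.length + 1 →
      (rs.foldl (pvStep1 loc rng) d).length = bc.length + 1 ∧
      ∀ b : Nat, b < bc.length →
        pvS d b - rs.length ≤ pvS (rs.foldl (pvStep1 loc rng) d) b ∧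
        pvS (rs.foldl (pvStep1 loc rng) d) b ≤ pvS d b + rs.length := by
  induction rs with
  | nil => intro d hd; simp [hd]
  | cons r rs ih =>
    intro d hd
    obtain ⟨hr0, hrlt⟩ := hrs r (by simp)
    have hrs' : ∀ x ∈ rs, 0 ≤ x ∧ x < (loc.length : Int) :=
      fun x hx => hrs x (List.mem_cons_of_mem _ hx)
    have hstep_len : (pvStep1 loc rng d r).length = bc.length + 1 := by
      simp [pvStep1, PySem.List.length_pySetD, hd]
    rw [List.foldl_cons]
    obtain ⟨hlen', hsum'⟩ := ih hrs' (pvStep1 loc rng d r) hstep_len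
    refine ⟨hlen', ?_⟩
    intro b hb
    obtain ⟨hlow, hhigh⟩ := hsum' b hb
    have hkmem : r.toNat ∈ List.range loc.length := List.mem_range.mpr (by omega)
    have hgl : loc.getD r.toNat 0 = PySem.List.pyGetD loc r 0 := by
      conv_rhs => rw [← Int.toNat_of_nonneg hr0]
      rw [PySem.List.pyGetD_natCast]
    have hgr : rng.getD r.toNat 0 = PySem.List.pyGetD rng r 0 := by
      conv_rhs => rw [← Int.toNat_of_nonneg hr0]
      rw [PySem.List.pyGetD_natCast]
    have hn := hnr r.toNat hkmem
    rw [hgl, hgr] at hn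
    have hone : pvS d b - 1 ≤ pvS (pvStep1 loc rng d r) b ∧
        pvS (pvStep1 loc rng d r) b ≤ pvS d b + 1 := by
      simp only [pvStep1, PySem.List.len_eq, hd]
      rw [pvStep_two_writes d bc.length hd _ _ (by split_ifs <;> omega)
            (by split_ifs <;> omega)
            (by split_ifs <;> push_cast <;> omega)
            (by split_ifs <;> push_cast <;> omega) b hb]
      constructor <;> split_ifs <;> omega
    simp only [List.length_cons]
    push_cast
    omega

theorem pvA_fold1_nonneg (bc loc rng : List Int)
    (hnr : ∀ k ∈ List.range loc.length,
      loc.getD k 0 - 1 - rng.getD k 0 ≤ (bc.length : Int) ∧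
      -((bc.length : Int) + 1) ≤ loc.getD k 0 - 1 + rng.getD k 0)
    (hrg : ∀ k ∈ List.range loc.length, 0 ≤ rng.getD k 0)
    (rs : List Int)
    (hrs : ∀ r ∈ rs, 0 ≤ r ∧ r < (loc.length : Int)) :
    ∀ d : List Int, d.length = bc.length + 1 →
      ∀ b : Nat, b < bc.length →
        pvS d b ≤ pvS (rs.foldl (pvStep1 loc rng) d) b := by
  induction rs with
  | nil => intro d hd b hb; simp
  | cons r rs ih =>
    intro d hd b hb
    obtain ⟨hr0, hrlt⟩ := hrs r (by simp)
    have hrs' : ∀ x ∈ rs, 0 ≤ x ∧ x < (loc.length : Int) :=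
      fun x hx => hrs x (List.mem_cons_of_mem _ hx)
    have hstep_len : (pvStep1 loc rng d r).length = bc.length + 1 := by
      simp [pvStep1, PySem.List.length_pySetD, hd]
    rw [List.foldl_cons]
    have htail := ih hrs' (pvStep1 loc rng d r) hstep_len b hb
    have hkmem : r.toNat ∈ List.range loc.length := List.mem_range.mpr (by omega)
    have hgl : loc.getD r.toNat 0 = PySem.List.pyGetD loc r 0 := by
      conv_rhs => rw [← Int.toNat_of_nonneg hr0]
      rw [PySem.List.pyGetD_natCast]
    have hgr : rng.getD r.toNat 0 = PySem.List.pyGetD rng r 0 := by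
      conv_rhs => rw [← Int.toNat_of_nonneg hr0]
      rw [PySem.List.pyGetD_natCast]
    have hn := hnr r.toNat hkmem
    have hq := hrg r.toNat hkmem
    rw [hgl, hgr] at hn
    rw [hgr] at hq
    have hone : pvS d b ≤ pvS (pvStep1 loc rng d r) b := by
      simp only [pvStep1, PySem.List.len_eq, hd]
      rw [pvStep_two_writes d bc.length hd _ _ (by split_ifs <;> omega)
            (by split_ifs <;> omega)
            (by split_ifs <;> push_cast <;> omega)
            (by split_ifs <;> push_cast <;> omega) b hb]
      split_ifs <;> omega
    omega

theorem pvA_fold2 (base : List Int) (n : Nat) (hb : base.length = n + 1) :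
    ∀ t : Nat, t ≤ n →
      ((PySem.List.pyRange 1 ((t : Int) + 1) 1).foldl pvStep2 base).length = n + 1 ∧
      ∀ j : Nat, j ≤ n →
        ((PySem.List.pyRange 1 ((t : Int) + 1) 1).foldl pvStep2 base).getD j 0
          = if j ≤ t then pvS base j else base.getD j 0 := by
  intro t
  induction t with
  | zero =>
    intro _
    rw [show ((0 : Nat) : Int) + 1 = 1 by norm_num, PySem.List.pyRange_one_eq_nil (by norm_num)]
    refine ⟨by simpa using hb, ?_⟩
    intro j hj
    cases j with
    | zero => simp [pvS_zero]
    | succ j => simp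
  | succ t ih =>
    intro ht
    obtain ⟨hl, hv⟩ := ih (by omega)
    rw [show ((t + 1 : Nat) : Int) + 1 = ((t : Int) + 1) + 1 by push_cast; ring,
      PySem.List.pyRange_one_succ_right (by omega), List.foldl_append, List.foldl_cons,
      List.foldl_nil]
    generalize hP : (PySem.List.pyRange 1 ((t : Int) + 1) 1).foldl pvStep2 base = prev at hl hv
    simp only [pvStep2]
    rw [show (t : Int) + 1 = ((t + 1 : Nat) : Int) by push_cast; ring,
      PySem.List.pySetD_natCast, PySem.List.pyGetD_natCast,
      show ((t + 1 : Nat) : Int) - 1 = ((t : Nat) : Int) by push_cast; ring,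
      PySem.List.pyGetD_natCast,
      hv (t + 1) (by omega), hv t (by omega), if_neg (by omega), if_pos (le_refl t)]
    refine ⟨by simpa using hl, ?_⟩
    intro j hj
    rw [List.getD_eq_getElem?_getD, List.getElem?_set]
    by_cases hjt : t + 1 = j
    · subst hjt
      rw [if_pos rfl, if_pos (le_refl _), if_pos (by omega)]
      simp [pvS_succ base t]
      ring
    · rw [if_neg hjt, ← List.getD_eq_getElem?_getD, hv j hj,
        if_congr (show j ≤ t ↔ j ≤ t + 1 by omega) rfl rfl]

theorem pvRep_zero (n b : Nat) : pvS (List.replicate n (0 : Int)) b = 0 := by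
  simp [pvS, List.take_replicate, List.sum_replicate]

-- ===== VERDICT (by name: the statement is the Claim_ definition above) =====
theorem getServedBuildings_spec : Claim_equal_getServedBuildings := by
  intro bc loc rng _hdom hpre
  obtain ⟨hlen, hnr, hdis⟩ := hpre
  unfold Spec_getServedBuildings
  simp only [getServedBuildings, getServedBuildings_alt]
  rw [PySem.List.len_eq loc, PySem.List.len_eq bc]
  rw [show (PySem.List.pyRange 0 (loc.length : Int) 1).foldl (pvStep1 loc rng)
        (List.replicate (bc.length + 1) 0) = pvDiff1 bc loc rng from rfl]
  have hmem : ∀ r ∈ PySem.List.pyRange 0 (loc.length : Int) 1, 0 ≤ r ∧ r < (loc.length : Int) :=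
    fun r hr => PySem.List.mem_pyRange_one.mp hr
  obtain ⟨hA1len, hA1bnd⟩ :=
    pvA_fold1_bound bc loc rng hnr _ hmem (List.replicate (bc.length + 1) 0) (by simp)
  have hA1len' : (pvDiff1 bc loc rng).length = bc.length + 1 := hA1len
  have hA1bnd' : ∀ b : Nat, b < bc.length →
      pvS (List.replicate (bc.length + 1) 0) b
          - (PySem.List.pyRange 0 (loc.length : Int) 1).length
        ≤ pvS (pvDiff1 bc loc rng) b ∧
      pvS (pvDiff1 bc loc rng) b
        ≤ pvS (List.replicate (bc.length + 1) 0) b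
            + (PySem.List.pyRange 0 (loc.length : Int) 1).length := hA1bnd
  rw [PySem.List.len_eq (pvDiff1 bc loc rng), hA1len',
    show ((bc.length + 1 : Nat) : Int) = (bc.length : Int) + 1 by push_cast; ring]
  obtain ⟨hA2len, hA2val⟩ := pvA_fold2 (pvDiff1 bc loc rng) bc.length hA1len' bc.length (le_refl _)
  apply PySem.List.foldl_congr_mem
  intro acc x hx
  obtain ⟨hx0, hxn⟩ := PySem.List.mem_pyRange_one.mp hx
  -- B's inner loop counts the covering routers
  have hcov : (PySem.List.pyRange 0 (loc.length : Int) 1).foldl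
        (pvCovStep loc rng (bc.length : Int) x) 0
      = ((PySem.List.pyRange 0 (loc.length : Int) 1).countP
          (fun r => decide (pvP loc rng (bc.length : Int) x r)) : Int) := by
    rw [show pvCovStep loc rng (bc.length : Int) x
          = (fun c r => if pvP loc rng (bc.length : Int) x r then c + 1 else c) from rfl,
      PySem.List.foldl_ite_add_one (pvP loc rng (bc.length : Int) x) _ 0, zero_add]
  have hxx : ((x.toNat : Nat) : Int) = x := Int.toNat_of_nonneg hx0
  -- A's prefix-summed array at x
  have hAval : PySem.List.pyGetD
        ((PySem.List.pyRange 1 ((bc.length : Int) + 1) 1).foldl pvStep2 (pvDiff1 bc loc rng)) x 0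
      = pvS (pvDiff1 bc loc rng) x.toNat := by
    rw [← hxx, PySem.List.pyGetD_natCast, hA2val x.toNat (by omega), if_pos (by omega)]
    simp only [Int.toNat_natCast]
  rcases hdis with hnice | hext | ⟨hrg, hmix⟩
  · -- natural domain: the prefix sum IS the rescan count
    obtain ⟨_, hA1sum⟩ :=
      pvA_fold1 bc loc rng hnice _ hmem (List.replicate (bc.length + 1) 0) (by simp)
    have hA1sum' : pvS (pvDiff1 bc loc rng) x.toNat
        = pvS (List.replicate (bc.length + 1) 0) x.toNat
          + ((PySem.List.pyRange 0 (loc.length : Int) 1).countP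
              (fun r => decide (pvP loc rng (bc.length : Int) ((x.toNat : Nat) : Int) r)) : Int) :=
      hA1sum x.toNat (by omega)
    rw [hxx] at hA1sum'
    rw [hcov, hAval, hA1sum', pvRep_zero, zero_add]
  · -- threshold-forced: both decisions equal because |count| ≤ number of routers < |threshold|
    have hvmem : PySem.List.pyGetD bc x 0 ∈ bc :=
      PySem.List.pyGetD_mem bc 0 ⟨by omega, by omega⟩
    have hve := hext _ hvmem
    obtain ⟨hSlo, hShi⟩ := hA1bnd' x.toNat (by omega)
    rw [pvRep_zero, PySem.List.length_pyRange_one] at hSlo hShi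
    have hcle : ((PySem.List.pyRange 0 (loc.length : Int) 1).countP
          (fun r => decide (pvP loc rng (bc.length : Int) x r))
        ≤ (PySem.List.pyRange 0 (loc.length : Int) 1).length) := List.countP_le_length
    rw [PySem.List.length_pyRange_one] at hcle
    rw [hcov, hAval]
    have hm : (((loc.length : Int) - 0).toNat : Int) = (loc.length : Int) := by omega
    rw [hm] at hSlo hShi
    split_ifs with h1 h2 h2 <;> first | rfl | (exfalso; omega)
  · -- nonnegative ranges: counts lie in [0, m]; thresholds ≤ 0 or > m force the decisions
    have hvmem : PySem.List.pyGetD bc x 0 ∈ bc :=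
      PySem.List.pyGetD_mem bc 0 ⟨by omega, by omega⟩
    have hve := hmix _ hvmem
    obtain ⟨_, hShi⟩ := hA1bnd' x.toNat (by omega)
    rw [pvRep_zero, PySem.List.length_pyRange_one] at hShi
    have hSlo : (0 : Int) ≤ pvS (pvDiff1 bc loc rng) x.toNat := by
      have := pvA_fold1_nonneg bc loc rng hnr hrg _ hmem
        (List.replicate (bc.length + 1) 0) (by simp) x.toNat (by omega)
      rwa [pvRep_zero] at this
    have hcle : ((PySem.List.pyRange 0 (loc.length : Int) 1).countP
          (fun r => decide (pvP loc rng (bc.length : Int) x r))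
        ≤ (PySem.List.pyRange 0 (loc.length : Int) 1).length) := List.countP_le_length
    rw [PySem.List.length_pyRange_one] at hcle
    rw [hcov, hAval]
    have hm : (((loc.length : Int) - 0).toNat : Int) = (loc.length : Int) := by omega
    rw [hm] at hShi
    split_ifs with h1 h2 h2 <;> first | rfl | (exfalso; omega)
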